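-- pv_equiv track=rewrite | github.com/RishbhaJain/Ask-Your-Emails | app.py | get_filtered_results
-- ===== SOURCE A (Python) =====
-- def get_filtered_results(results, selected_from, selected_to, selected_years):
--     """Apply all filters to results"""
--     filtered = results
--
--     if selected_from:
--         filtered = [r for r in filtered if r['from'] in selected_from]
--     if selected_to:
--         filtered = [r for r in filtered if r['to'] in selected_to]
--     if selected_years:
--         filtered = [r for r in filtered if r.get('date') and int(r['date'].split('-')[0]) in selected_years]
--
--     return filtered
-- ===== SOURCE B (Python) =====
-- def get_filtered_results(results, selected_from, selected_to, selected_years):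
--     """Apply all filters in one pass, guard-chain per row (same check order as A)."""
--     def keep(r):
--         if selected_from and r['from'] not in selected_from:
--             return False
--         if selected_to and r['to'] not in selected_to:
--             return False
--         if selected_years and not (r.get('date') and int(r['date'].split('-')[0]) in selected_years):
--             return False
--         return True
--     return [r for r in results if keep(r)]
-- ===== Notes on version B (the rewrite author's own statement) =====
-- stated objective: simpler
-- what changed: B replaces A's three sequential filtering passes (each rebuilding the list) by a single pass over results with a per-row early-return guard chain applying the from/to/year checks in A's order.
import Mathlib
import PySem

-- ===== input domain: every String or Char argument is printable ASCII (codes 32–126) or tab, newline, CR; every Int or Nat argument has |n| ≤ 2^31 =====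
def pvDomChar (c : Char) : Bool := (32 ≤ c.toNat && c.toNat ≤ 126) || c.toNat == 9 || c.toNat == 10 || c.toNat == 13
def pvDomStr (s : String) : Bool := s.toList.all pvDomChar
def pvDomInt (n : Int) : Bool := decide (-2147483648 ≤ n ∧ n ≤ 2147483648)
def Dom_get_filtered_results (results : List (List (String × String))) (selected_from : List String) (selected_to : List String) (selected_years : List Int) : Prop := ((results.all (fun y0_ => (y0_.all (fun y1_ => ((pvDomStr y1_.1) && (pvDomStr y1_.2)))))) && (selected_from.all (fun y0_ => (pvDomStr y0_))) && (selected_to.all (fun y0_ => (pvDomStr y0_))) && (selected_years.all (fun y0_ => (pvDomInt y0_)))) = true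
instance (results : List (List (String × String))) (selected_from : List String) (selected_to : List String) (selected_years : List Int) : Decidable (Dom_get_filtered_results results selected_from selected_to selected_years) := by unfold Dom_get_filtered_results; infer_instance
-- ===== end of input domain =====

-- B replaces A's three sequential filtering passes by a single pass with a per-row
-- guard chain in the same check order (objective: simpler, one scan instead of three).

-- shared helper: Python dict lookup r.get(k) on the row (first match)
def pvRowGet? (r : List (String × String)) (k : String) : Option String :=
  (r.find? (fun p => p.1 == k)).map (·.2)

-- ===== PORT A =====
-- r['from'] in selected_from  (missing key = KeyError, excluded by Pre_; port returns false there)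
def pvAFromPred (selected_from : List String) (r : List (String × String)) : Bool :=
  match pvRowGet? r "from" with
  | some v => selected_from.contains v
  | none => false

def pvAToPred (selected_to : List String) (r : List (String × String)) : Bool :=
  match pvRowGet? r "to" with
  | some v => selected_to.contains v
  | none => false

-- r.get('date') and int(r['date'].split('-')[0]) in selected_years
-- (unparseable year = ValueError, excluded by Pre_; port returns false there)
def pvAYearPred (selected_years : List Int) (r : List (String × String)) : Bool :=
  match pvRowGet? r "date" with
  | none => false
  | some d =>
    if d = "" then false
    else match PySem.Int.ofStr? (((PySem.Str.split? d "-").getD []).headD "") with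
      | some y => selected_years.contains y
      | none => false

def get_filtered_results (results : List (List (String × String))) (selected_from : List String) (selected_to : List String) (selected_years : List Int) : List (List (String × String)) :=
  let filtered := results
  let filtered := if selected_from ≠ [] then filtered.filter (pvAFromPred selected_from) else filtered
  let filtered := if selected_to ≠ [] then filtered.filter (pvAToPred selected_to) else filtered
  let filtered := if selected_years ≠ [] then filtered.filter (pvAYearPred selected_years) else filtered
  filtered

-- ===== PORT B =====
-- Source B's keep(r): early-return guard chain, one pass
def pvBKeep (selected_from : List String) (selected_to : List String) (selected_years : List Int) (r : List (String × String)) : Bool :=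
  if selected_from ≠ [] &&
     !(match pvRowGet? r "from" with | some v => selected_from.contains v | none => false) then
    false
  else if selected_to ≠ [] &&
     !(match pvRowGet? r "to" with | some v => selected_to.contains v | none => false) then
    false
  else if selected_years ≠ [] &&
     !(match pvRowGet? r "date" with
       | none => false
       | some d =>
         if d = "" then false
         else match PySem.Int.ofStr? (((PySem.Str.split? d "-").getD []).headD "") with
           | some y => selected_years.contains y
           | none => false) then
    false
  else true

def get_filtered_results_alt (results : List (List (String × String))) (selected_from : List String) (selected_to : List String) (selected_years : List Int) : List (List (String × String)) :=
  results.filter (pvBKeep selected_from selected_to selected_years)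

-- ===== PRECONDITION & SPEC =====
-- Pre_ excludes exactly the inputs on which Python A raises: a row reaching the
-- 'from'/'to' check without that key (KeyError), or reaching the year check with a
-- truthy date whose part before the first '-' is not int-parseable (ValueError).
def Pre_get_filtered_results (results : List (List (String × String))) (selected_from : List String) (selected_to : List String) (selected_years : List Int) : Prop :=
  ∀ r ∈ results,
    (selected_from ≠ [] → (pvRowGet? r "from").isSome) ∧
    (selected_to ≠ [] → (selected_from = [] ∨ pvAFromPred selected_from r = true) →
      (pvRowGet? r "to").isSome) ∧
    (selected_years ≠ [] → (selected_from = [] ∨ pvAFromPred selected_from r = true) →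
      (selected_to = [] ∨ pvAToPred selected_to r = true) →
      ((match pvRowGet? r "date" with
        | none => true
        | some d => decide (d = "") || (PySem.Int.ofStr? (((PySem.Str.split? d "-").getD []).headD "")).isSome) = true))
instance (results : List (List (String × String))) (selected_from : List String) (selected_to : List String) (selected_years : List Int) : Decidable (Pre_get_filtered_results results selected_from selected_to selected_years) := by unfold Pre_get_filtered_results; infer_instance

def pvWitness_get_filtered_results : (List (List (String × String))) × List String × List String × List Int :=
  ([[("from", "a"), ("to", "b"), ("date", "2020-01-02")], [("from", "c")]], ["a"], ["b"], [2020])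

def Spec_get_filtered_results (results : List (List (String × String))) (selected_from : List String) (selected_to : List String) (selected_years : List Int) (out : List (List (String × String))) : Prop := out = get_filtered_results_alt results selected_from selected_to selected_years
instance (results : List (List (String × String))) (selected_from : List String) (selected_to : List String) (selected_years : List Int) (out : List (List (String × String))) : Decidable (Spec_get_filtered_results results selected_from selected_to selected_years out) := by unfold Spec_get_filtered_results; infer_instance

-- ===== CLAIM (what is proved, stated in full; the proofs are below) =====
def Claim_equal_get_filtered_results : Prop := ∀ (results : List (List (String × String))) (selected_from : List String) (selected_to : List String) (selected_years : List Int), Dom_get_filtered_results results selected_from selected_to selected_years → Pre_get_filtered_results results selected_from selected_to selected_years → Spec_get_filtered_results results selected_from selected_to selected_years (get_filtered_results results selected_from selected_to selected_years)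

-- ===== LEMMAS AND PROOFS =====
theorem pvWitness_ok : Dom_get_filtered_results pvWitness_get_filtered_results.1 pvWitness_get_filtered_results.2.1 pvWitness_get_filtered_results.2.2.1 pvWitness_get_filtered_results.2.2.2 ∧ Pre_get_filtered_results pvWitness_get_filtered_results.1 pvWitness_get_filtered_results.2.1 pvWitness_get_filtered_results.2.2.1 pvWitness_get_filtered_results.2.2.2 := by decide

-- B's guard chain, re-read as a conjunction of A's three pass predicates
theorem pvBKeep_eq (sf st : List String) (sy : List Int) (r : List (String × String)) :
    pvBKeep sf st sy r =
      ((!decide (sf ≠ []) || pvAFromPred sf r) &&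
       ((!decide (st ≠ []) || pvAToPred st r) &&
        (!decide (sy ≠ []) || pvAYearPred sy r))) := by
  have h : pvBKeep sf st sy r =
      (if decide (sf ≠ []) && !pvAFromPred sf r then false
       else if decide (st ≠ []) && !pvAToPred st r then false
       else if decide (sy ≠ []) && !pvAYearPred sy r then false
       else true) := rfl
  rw [h]
  cases decide (sf ≠ []) <;> cases decide (st ≠ []) <;> cases decide (sy ≠ []) <;>
    cases pvAFromPred sf r <;> cases pvAToPred st r <;> cases pvAYearPred sy r <;> rfl

-- ===== VERDICT (by name: the statement is the Claim_ definition above) =====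
theorem get_filtered_results_spec : Claim_equal_get_filtered_results := by
  intro results sf st sy hdom hpre
  clear hdom hpre
  unfold Spec_get_filtered_results get_filtered_results get_filtered_results_alt
  split_ifs with h1 h2 h3 h4 h5 h6 h7 <;>
    first
    | (symm; rw [List.filter_eq_self]; intro r _; simp [pvBKeep_eq, *])
    | (symm; simp only [List.filter_filter]; apply List.filter_congr; intro r _;
       simp [pvBKeep_eq, Bool.and_comm, Bool.and_left_comm, *])
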